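-- pv_equiv track=rewrite | github.com/ultrasilicon/CS115 | life_starter/life.py | innerCells
-- ===== SOURCE A (Python) =====
-- def innerCells(w,h):
--     """returns a 2d array of all live cells - with the value of 1 - except for a one-cell-wide border of empty cells (with the value of 0) around the edge of the 2d array."""
--     ret = []
--     for i in range(h):
--         if i != 0 and i != h - 1:
--             row = []
--             for j in range(w):
--                 if j != 0 and j != w - 1:
--                     row.append(1)
--                 else:
--                     row.append(0)
--             ret.append(row)
--         else:
--             ret.append([0] * w)
--     return ret
-- ===== SOURCE B (Python) =====
-- def innerCells(w, h):
--     n = max(w, 0) * max(h, 0)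
--     flat = [1] * n
--     if n:
--         for j in range(w):
--             flat[j] = 0
--             flat[n - 1 - j] = 0
--         for i in range(h):
--             flat[i * w] = 0
--             flat[i * w + w - 1] = 0
--     return [flat[i * w:(i + 1) * w] for i in range(h)]
-- ===== Notes on version B (the rewrite author's own statement) =====
-- stated objective: alternative
-- what changed: B allocates one flat w*h buffer of ones, zeroes the four border segments by index arithmetic on the flat buffer, and chunks it into rows by slicing, instead of A's nested per-cell conditional loops building each row.
import Mathlib
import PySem

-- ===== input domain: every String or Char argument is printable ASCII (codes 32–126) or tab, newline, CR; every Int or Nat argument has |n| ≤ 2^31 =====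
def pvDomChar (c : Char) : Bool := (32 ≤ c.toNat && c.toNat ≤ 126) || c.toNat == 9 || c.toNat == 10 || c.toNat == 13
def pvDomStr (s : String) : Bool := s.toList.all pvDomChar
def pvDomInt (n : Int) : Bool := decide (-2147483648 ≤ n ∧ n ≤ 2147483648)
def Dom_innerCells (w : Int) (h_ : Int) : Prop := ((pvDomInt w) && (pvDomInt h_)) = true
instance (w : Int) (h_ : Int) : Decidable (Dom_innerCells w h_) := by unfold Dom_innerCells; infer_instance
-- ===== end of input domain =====

-- B builds one flat length-w*h buffer of ones, zeroes the four border segments by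
-- index arithmetic on the flat buffer, and chunks it into rows (objective: alternative).

-- ===== PORT A =====
-- A's two append-accumulator loops are ported as maps over the same ranges with the
-- same branches (the exact identity PySem.List.foldl_append_singleton_eq_map), so the
-- port evaluates in linear time; branch order and cell values are A's.
def innerCells (w : Int) (h_ : Int) : List (List Int) :=
  (PySem.List.pyRange 0 h_ 1).map (fun i =>
    if i ≠ 0 ∧ i ≠ h_ - 1 then
      (PySem.List.pyRange 0 w 1).map (fun j => if j ≠ 0 ∧ j ≠ w - 1 then (1 : Int) else 0)
    else PySem.List.pyRepeat [(0 : Int)] w)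

-- ===== PORT B =====
-- faithful to Source B with the Python mutable list modelled as Array Int: inside the
-- `if n:` branch every written index is in range and nonnegative, so `flat[k] = 0` is
-- exactly `Array.set!`, and the slice flat[i*w:(i+1)*w] (all bounds nonnegative) is
-- exactly `Array.extract`.
def innerCells_alt (w : Int) (h_ : Int) : List (List Int) :=
  let n : Int := max w 0 * max h_ 0
  let flat : Array Int := (PySem.List.pyRepeat [(1 : Int)] n).toArray
  let flat : Array Int :=
    if n ≠ 0 then
      let flat := (PySem.List.pyRange 0 w 1).foldl
        (fun f j => (f.set! j.toNat 0).set! (n - 1 - j).toNat 0) flat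
      (PySem.List.pyRange 0 h_ 1).foldl
        (fun f i => (f.set! (i * w).toNat 0).set! (i * w + w - 1).toNat 0) flat
    else flat
  (PySem.List.pyRange 0 h_ 1).map
    (fun i => (flat.extract (i * w).toNat ((i + 1) * w).toNat).toList)

-- ===== PRECONDITION & SPEC =====
def Spec_innerCells (w : Int) (h_ : Int) (out : List (List Int)) : Prop := out = innerCells_alt w h_
instance (w : Int) (h_ : Int) (out : List (List Int)) : Decidable (Spec_innerCells w h_ out) := by unfold Spec_innerCells; infer_instance

-- ===== CLAIM (what is proved, stated in full; the proofs are below) =====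
def Claim_equal_innerCells : Prop := ∀ (w : Int) (h_ : Int), Dom_innerCells w h_ → Spec_innerCells w h_ (innerCells w h_)

-- ===== LEMMAS AND PROOFS =====

-- the common closed-form grid both ports are proved equal to
def pvGrid (w : Int) (h_ : Int) : List (List Int) :=
  (PySem.List.pyRange 0 h_ 1).map (fun i =>
    (PySem.List.pyRange 0 w 1).map (fun j =>
      if i = 0 ∨ i = h_ - 1 ∨ j = 0 ∨ j = w - 1 then (0 : Int) else 1))

theorem pv_length_foldl_set2 (l : List Int) (a b : Int → Nat) (f0 : List Int) :
    (l.foldl (fun f j => (f.set (a j) 0).set (b j) 0) f0).length = f0.length := by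
  induction l generalizing f0 with
  | nil => rfl
  | cons x xs ih => simp [List.foldl_cons, ih]

theorem pv_foldl_set2_getElem? (l : List Int) (a b : Int → Nat) (f0 : List Int) (k : Nat)
    (hk : k < f0.length) :
    (l.foldl (fun f j => (f.set (a j) 0).set (b j) 0) f0)[k]?
      = some (if (∃ j ∈ l, a j = k ∨ b j = k) then 0 else f0[k]'hk) := by
  induction l generalizing f0 with
  | nil => simp [List.getElem?_eq_getElem hk]
  | cons x xs ih =>
    rw [List.foldl_cons, ih _ (by simp [hk])]
    by_cases h2 : ∃ j ∈ xs, a j = k ∨ b j = k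
    · rw [if_pos h2, if_pos ⟨h2.choose, List.mem_cons_of_mem _ h2.choose_spec.1, h2.choose_spec.2⟩]
    · rw [if_neg h2]
      by_cases hx : a x = k ∨ b x = k
      · rw [if_pos ⟨x, List.mem_cons_self, hx⟩]
        simp only [List.getElem_set]
        rcases hx with h | h <;> simp [h]
      · rw [if_neg (by
          rintro ⟨j, hj, hjk⟩
          rcases List.mem_cons.mp hj with rfl | hj
          · exact hx hjk
          · exact h2 ⟨j, hj, hjk⟩)]
        simp only [List.getElem_set]
        rw [if_neg (fun h => hx (Or.inr h)), if_neg (fun h => hx (Or.inl h))]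

theorem pv_toNat_mul (a b : Int) (ha : 0 ≤ a) (hb : 0 ≤ b) :
    (a * b).toNat = a.toNat * b.toNat := by
  have h1 : ((a * b).toNat : Int) = a * b := Int.toNat_of_nonneg (mul_nonneg ha hb)
  have h2 : ((a.toNat * b.toNat : Nat) : Int) = a * b := by
    push_cast [Int.toNat_of_nonneg ha, Int.toNat_of_nonneg hb]; ring
  exact_mod_cast h1.trans h2.symm

theorem pv_A_eq_grid (w h_ : Int) : innerCells w h_ = pvGrid w h_ := by
  unfold innerCells pvGrid
  apply List.map_congr_left
  intro i _
  by_cases hb : i ≠ 0 ∧ i ≠ h_ - 1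
  · rw [if_pos hb]
    apply List.map_congr_left
    intro j _
    split_ifs <;> tauto
  · rw [if_neg hb, PySem.List.pyRepeat_singleton]
    symm
    have hcond : ∀ j ∈ PySem.List.pyRange 0 w 1,
        (if i = 0 ∨ i = h_ - 1 ∨ j = 0 ∨ j = w - 1 then (0 : Int) else 1) = (fun _ => (0 : Int)) j := by
      intro j _
      rw [if_pos (by tauto)]
    rw [List.map_congr_left hcond, List.map_const', PySem.List.length_pyRange_one]
    norm_num

theorem pv_slice_nil (a b : Int) : PySem.List.slice ([] : List Int) (some a) (some b) = [] := by
  apply List.eq_nil_of_length_eq_zero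
  rw [PySem.List.length_slice]
  have h1 : PySem.List.clampIdx ([] : List Int).length b ≤ ([] : List Int).length :=
    PySem.List.clampIdx_le _ _
  simp only [List.length_nil] at h1 ⊢
  omega

theorem pv_loop1_getElem? (n : Int) (l : List Int) (f0 : List Int) (k : Nat) (hk : k < f0.length) :
    (l.foldl (fun f j => (f.set j.toNat 0).set (n - 1 - j).toNat 0) f0)[k]?
      = some (if (∃ j ∈ l, j.toNat = k ∨ (n - 1 - j).toNat = k) then 0 else f0[k]'hk) :=
  pv_foldl_set2_getElem? l (fun j => j.toNat) (fun j => (n - 1 - j).toNat) f0 k hk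

theorem pv_loop2_getElem? (w : Int) (l : List Int) (f0 : List Int) (k : Nat) (hk : k < f0.length) :
    (l.foldl (fun f i => (f.set (i * w).toNat 0).set (i * w + w - 1).toNat 0) f0)[k]?
      = some (if (∃ i ∈ l, (i * w).toNat = k ∨ (i * w + w - 1).toNat = k) then 0 else f0[k]'hk) :=
  pv_foldl_set2_getElem? l (fun i => (i * w).toNat) (fun i => (i * w + w - 1).toNat) f0 k hk

theorem pv_loop1_length (n : Int) (l f0 : List Int) :
    (l.foldl (fun f j => (f.set j.toNat 0).set (n - 1 - j).toNat 0) f0).length = f0.length :=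
  pv_length_foldl_set2 l _ _ f0

theorem pv_loop2_length (w : Int) (l f0 : List Int) :
    (l.foldl (fun f i => (f.set (i * w).toNat 0).set (i * w + w - 1).toNat 0) f0).length = f0.length :=
  pv_length_foldl_set2 l _ _ f0

theorem pv_flat_get (w h_ : Int) (k : Nat) (hk : k < (w * h_).toNat) :
    ((PySem.List.pyRange 0 h_ 1).foldl
        (fun f i => (f.set (i * w).toNat 0).set (i * w + w - 1).toNat 0)
        ((PySem.List.pyRange 0 w 1).foldl
          (fun f j => (f.set j.toNat 0).set (w * h_ - 1 - j).toNat 0)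
          (PySem.List.pyRepeat [(1 : Int)] (w * h_))))[k]?
      = some (if (∃ i ∈ PySem.List.pyRange 0 h_ 1, (i * w).toNat = k ∨ (i * w + w - 1).toNat = k)
              then 0
              else if (∃ j ∈ PySem.List.pyRange 0 w 1, j.toNat = k ∨ (w * h_ - 1 - j).toNat = k)
              then 0 else 1) := by
  have hbase : (PySem.List.pyRepeat [(1 : Int)] (w * h_)).length = (w * h_).toNat := by
    rw [PySem.List.pyRepeat_singleton, List.length_replicate]
  have hk0 : k < (PySem.List.pyRepeat [(1 : Int)] (w * h_)).length := by omega
  have hk1 : k < ((PySem.List.pyRange 0 w 1).foldl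
      (fun f j => (f.set j.toNat 0).set (w * h_ - 1 - j).toNat 0)
      (PySem.List.pyRepeat [(1 : Int)] (w * h_))).length := by
    rw [pv_loop1_length]; omega
  rw [pv_loop2_getElem? w _ _ k hk1]
  have h1 := pv_loop1_getElem? (w * h_) (PySem.List.pyRange 0 w 1)
      (PySem.List.pyRepeat [(1 : Int)] (w * h_)) k hk0
  by_cases h2 : ∃ i ∈ PySem.List.pyRange 0 h_ 1, (i * w).toNat = k ∨ (i * w + w - 1).toNat = k
  · rw [if_pos h2, if_pos h2]
  · rw [if_neg h2, if_neg h2, ← List.getElem?_eq_getElem hk1, h1]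
    simp [PySem.List.pyRepeat_singleton]

theorem pv_hC2 (w h_ i : Int) (k : Nat) (hw : 0 < w) (hh : 0 < h_)
    (hi0 : 0 ≤ i) (hih : i < h_) (hkw : k < w.toNat) :
    (∃ i' ∈ PySem.List.pyRange 0 h_ 1,
        (i' * w).toNat = i.toNat * w.toNat + k ∨ (i' * w + w - 1).toNat = i.toNat * w.toNat + k)
      ↔ ((k : Int) = 0 ∨ (k : Int) = w - 1) := by
  have hiw : (i * w).toNat = i.toNat * w.toNat := pv_toNat_mul i w hi0 hw.le
  have hx : 0 ≤ i * w := mul_nonneg hi0 hw.le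
  constructor
  · rintro ⟨i', hi', hc⟩
    obtain ⟨hi'0, hi'h⟩ := PySem.List.mem_pyRange_one.mp hi'
    have hf : (i' * w).toNat = i'.toNat * w.toNat := pv_toNat_mul i' w hi'0 hw.le
    have hx0 : 0 ≤ i' * w := mul_nonneg hi'0 hw.le
    rcases Nat.lt_trichotomy i'.toNat i.toNat with hlt' | heq | hgt
    · have h2 : (i'.toNat + 1) * w.toNat ≤ i.toNat * w.toNat :=
        Nat.mul_le_mul (by omega) (Nat.le_refl w.toNat)
      rw [Nat.add_mul, Nat.one_mul] at h2
      rcases hc with hc | hc <;> omega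
    · have h2 : i'.toNat * w.toNat = i.toNat * w.toNat := by rw [heq]
      rcases hc with hc | hc <;> omega
    · have h2 : (i.toNat + 1) * w.toNat ≤ i'.toNat * w.toNat :=
        Nat.mul_le_mul (by omega) (Nat.le_refl w.toNat)
      rw [Nat.add_mul, Nat.one_mul] at h2
      rcases hc with hc | hc <;> omega
  · rintro (hk0 | hk1)
    · exact ⟨i, PySem.List.mem_pyRange_one.mpr ⟨hi0, hih⟩, Or.inl (by omega)⟩
    · exact ⟨i, PySem.List.mem_pyRange_one.mpr ⟨hi0, hih⟩, Or.inr (by omega)⟩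

theorem pv_hC1 (w h_ i : Int) (k : Nat) (hw : 0 < w) (hh : 0 < h_)
    (hi0 : 0 ≤ i) (hih : i < h_) (hkw : k < w.toNat) :
    (∃ j ∈ PySem.List.pyRange 0 w 1,
        j.toNat = i.toNat * w.toNat + k ∨ (w * h_ - 1 - j).toNat = i.toNat * w.toNat + k)
      ↔ (i = 0 ∨ i = h_ - 1) := by
  have hwh : (w * h_).toNat = h_.toNat * w.toNat := by
    rw [pv_toNat_mul w h_ hw.le hh.le, Nat.mul_comm]
  have hrow : i.toNat * w.toNat + w.toNat ≤ h_.toNat * w.toNat := by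
    have h2 : (i.toNat + 1) * w.toNat ≤ h_.toNat * w.toNat :=
      Nat.mul_le_mul (by omega) (Nat.le_refl w.toNat)
    rw [Nat.add_mul, Nat.one_mul] at h2
    exact h2
  constructor
  · rintro ⟨j, hj, hc | hc⟩ <;> obtain ⟨hj0, hjw⟩ := PySem.List.mem_pyRange_one.mp hj
    · left
      by_contra hi0'
      have h2 : 1 * w.toNat ≤ i.toNat * w.toNat := Nat.mul_le_mul (by omega) (Nat.le_refl w.toNat)
      rw [Nat.one_mul] at h2
      omega
    · right
      by_contra hih'
      have h2 : (i.toNat + 2) * w.toNat ≤ h_.toNat * w.toNat :=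
        Nat.mul_le_mul (by omega) (Nat.le_refl w.toNat)
      rw [Nat.add_mul] at h2
      omega
  · rintro (rfl | hlast)
    · have h0 : (0 : Int).toNat * w.toNat = 0 := by norm_num
      exact ⟨(k : Int), PySem.List.mem_pyRange_one.mpr ⟨by omega, by omega⟩, Or.inl (by omega)⟩
    · have h1 : i.toNat + 1 = h_.toNat := by omega
      have h2 : (i.toNat + 1) * w.toNat = h_.toNat * w.toNat := by rw [h1]
      rw [Nat.add_mul, Nat.one_mul] at h2
      exact ⟨w * h_ - 1 - ((i.toNat * w.toNat + k : Nat) : Int),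
        PySem.List.mem_pyRange_one.mpr ⟨by omega, by omega⟩,
        Or.inr (by omega)⟩

-- proof-only helper: Source B's algorithm restated over plain lists (the port innerCells_alt
-- is bridged to this below, and this is proved equal to pvGrid)
def pvBL (w : Int) (h_ : Int) : List (List Int) :=
  let n : Int := max w 0 * max h_ 0
  let flat : List Int := PySem.List.pyRepeat [(1 : Int)] n
  let flat : List Int :=
    if n ≠ 0 then
      let flat := (PySem.List.pyRange 0 w 1).foldl
        (fun f j => (f.set j.toNat 0).set (n - 1 - j).toNat 0) flat
      (PySem.List.pyRange 0 h_ 1).foldl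
        (fun f i => (f.set (i * w).toNat 0).set (i * w + w - 1).toNat 0) flat
    else flat
  (PySem.List.pyRange 0 h_ 1).map
    (fun i => PySem.List.slice flat (some (i * w)) (some ((i + 1) * w)))

theorem pv_arr_fold2_toList (l : List Int) (a b : Int → Nat) (f0 : Array Int) :
    (l.foldl (fun f j => (f.set! (a j) 0).set! (b j) 0) f0).toList
      = l.foldl (fun f j => (f.set (a j) 0).set (b j) 0) f0.toList := by
  induction l generalizing f0 with
  | nil => rfl
  | cons x xs ih =>
    rw [List.foldl_cons, List.foldl_cons, ih]
    congr 1
    simp [Array.set!]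

theorem pv_arr_loop1_toList (n : Int) (l : List Int) (f0 : Array Int) :
    (l.foldl (fun f j => (f.set! j.toNat 0).set! (n - 1 - j).toNat 0) f0).toList
      = l.foldl (fun f j => (f.set j.toNat 0).set (n - 1 - j).toNat 0) f0.toList :=
  pv_arr_fold2_toList l (fun j => j.toNat) (fun j => (n - 1 - j).toNat) f0

theorem pv_arr_loop2_toList (w : Int) (l : List Int) (f0 : Array Int) :
    (l.foldl (fun f i => (f.set! (i * w).toNat 0).set! (i * w + w - 1).toNat 0) f0).toList
      = l.foldl (fun f i => (f.set (i * w).toNat 0).set (i * w + w - 1).toNat 0) f0.toList :=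
  pv_arr_fold2_toList l (fun i => (i * w).toNat) (fun i => (i * w + w - 1).toNat) f0

theorem pv_alt_eq_BL (w h_ : Int) : innerCells_alt w h_ = pvBL w h_ := by
  by_cases hh : h_ ≤ 0
  · simp only [innerCells_alt, pvBL, PySem.List.pyRange_one_eq_nil hh, List.map_nil]
  by_cases hw : w ≤ 0
  · have hn : max w 0 * max h_ 0 = 0 := by
      rw [max_eq_right hw, zero_mul]
    simp only [innerCells_alt, pvBL, hn, ne_eq, not_true_eq_false, if_false]
    apply List.map_congr_left
    intro i _
    rw [show PySem.List.pyRepeat [(1 : Int)] 0 = ([] : List Int) from by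
      rw [PySem.List.pyRepeat_singleton]; rfl]
    rw [pv_slice_nil]
    simp
  push_neg at hh hw
  have hmw : max w 0 = w := max_eq_left hw.le
  have hmh : max h_ 0 = h_ := max_eq_left hh.le
  simp only [innerCells_alt, pvBL, hmw, hmh]
  apply List.map_congr_left
  intro i hi
  obtain ⟨hi0, hih⟩ := PySem.List.mem_pyRange_one.mp hi
  rw [if_pos (mul_pos hw hh).ne', if_pos (mul_pos hw hh).ne']
  simp only [Array.toList_extract, List.extract_eq_take_drop,
    pv_arr_loop2_toList, pv_arr_loop1_toList, List.toList_toArray]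
  rw [PySem.List.slice_toNat _ (mul_nonneg hi0 hw.le) (mul_nonneg (by omega) hw.le)]

set_option maxHeartbeats 1600000 in
theorem pv_BL_eq_grid (w h_ : Int) : pvBL w h_ = pvGrid w h_ := by
  by_cases hh : h_ ≤ 0
  · simp only [pvBL, pvGrid, PySem.List.pyRange_one_eq_nil hh, List.map_nil]
  by_cases hw : w ≤ 0
  · have hn : max w 0 * max h_ 0 = 0 := by
      rw [max_eq_right hw, zero_mul]
    simp only [pvBL, pvGrid, hn, ne_eq, not_true_eq_false, if_false,
      PySem.List.pyRange_one_eq_nil hw, List.map_nil]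
    apply List.map_congr_left
    intro i _
    rw [show PySem.List.pyRepeat [(1 : Int)] 0 = ([] : List Int) from by
      rw [PySem.List.pyRepeat_singleton]; rfl]
    exact pv_slice_nil _ _
  push_neg at hh hw
  have hmw : max w 0 = w := max_eq_left hw.le
  have hmh : max h_ 0 = h_ := max_eq_left hh.le
  simp only [pvBL, pvGrid, hmw, hmh]
  apply List.map_congr_left
  intro i hi
  obtain ⟨hi0, hih⟩ := PySem.List.mem_pyRange_one.mp hi
  rw [if_pos (mul_pos hw hh).ne']
  have hiw : (i * w).toNat = i.toNat * w.toNat := pv_toNat_mul i w hi0 hw.le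
  have hiw1 : ((i + 1) * w).toNat = i.toNat * w.toNat + w.toNat := by
    have h0 : ((i + 1) * w).toNat = (i + 1).toNat * w.toNat := pv_toNat_mul (i + 1) w (by omega) hw.le
    have h1 : (i + 1).toNat = i.toNat + 1 := by omega
    rw [h0, h1, add_mul, one_mul]
  have hwh : (w * h_).toNat = h_.toNat * w.toNat := by
    rw [pv_toNat_mul w h_ hw.le hh.le, Nat.mul_comm]
  have hrow : i.toNat * w.toNat + w.toNat ≤ h_.toNat * w.toNat := by
    have h1 : i.toNat + 1 ≤ h_.toNat := by omega
    have h2 : (i.toNat + 1) * w.toNat ≤ h_.toNat * w.toNat := mul_le_mul_right' h1 w.toNat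
    rw [add_mul, one_mul] at h2
    exact h2
  rw [PySem.List.slice_toNat _ (mul_nonneg hi0 hw.le) (mul_nonneg (by omega) hw.le),
    hiw, hiw1, Nat.add_sub_cancel_left]
  apply List.ext_getElem
  · simp only [List.length_take, List.length_drop, pv_loop2_length, pv_loop1_length,
      PySem.List.pyRepeat_singleton, List.length_replicate, List.length_map,
      PySem.List.length_pyRange_one]
    omega
  intro k hgl hgr
  have hkw : k < w.toNat := by
    simp only [List.length_map, PySem.List.length_pyRange_one] at hgr
    omega
  simp only [List.getElem_take, List.getElem_drop, List.getElem_map,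
    PySem.List.getElem_pyRange_one, zero_add]
  have hidx : i.toNat * w.toNat + k < (w * h_).toNat := by omega
  have hchar := pv_flat_get w h_ (i.toNat * w.toNat + k) hidx
  have hlt : i.toNat * w.toNat + k < ((PySem.List.pyRange 0 h_ 1).foldl
      (fun f i => (f.set (i * w).toNat 0).set (i * w + w - 1).toNat 0)
      ((PySem.List.pyRange 0 w 1).foldl
        (fun f j => (f.set j.toNat 0).set (w * h_ - 1 - j).toNat 0)
        (PySem.List.pyRepeat [(1 : Int)] (w * h_)))).length := by
    simp only [pv_loop2_length, pv_loop1_length, PySem.List.pyRepeat_singleton,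
      List.length_replicate]
    omega
  rw [List.getElem?_eq_getElem hlt] at hchar
  rw [Option.some.inj hchar]
  have hC2 := pv_hC2 w h_ i k hw hh hi0 hih hkw
  have hC1 := pv_hC1 w h_ i k hw hh hi0 hih hkw
  by_cases hkb : (k : Int) = 0 ∨ (k : Int) = w - 1
  · rw [if_pos (hC2.mpr hkb), if_pos (by tauto)]
  · rw [if_neg (fun hcon => hkb (hC2.mp hcon))]
    by_cases hib : i = 0 ∨ i = h_ - 1
    · rw [if_pos (hC1.mpr hib), if_pos (by tauto)]
    · rw [if_neg (fun hcon => hib (hC1.mp hcon)), if_neg (by tauto)]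

-- ===== VERDICT (by name: the statement is the Claim_ definition above) =====
theorem innerCells_spec : Claim_equal_innerCells := by
  intro w h_ _
  show innerCells w h_ = innerCells_alt w h_
  rw [pv_A_eq_grid, pv_alt_eq_BL, pv_BL_eq_grid]
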